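-- pv_equiv track=rewrite | github.com/D1026/Coding4Interviews | algori2019/2019.py | cows
-- ===== SOURCE A (Python) =====
-- def cows(n):
--     res = [0,0,0,0,0,0,0,0,0,1]
--     born = [0,0,0,0,0,0,0,0,0,1]
--     for i in range(1, n):
--         temp = res[-1]+sum(born[4:9]) - born[0]
--         born = born[1:] + [sum(born[4:9])]
--         res = res[1:]+[temp]
--     return res[-1]
-- ===== SOURCE B (Python) =====
-- def cows(n):
--     SIZE = 11
--
--     def mat_mul(A, B):
--         return [[sum(A[i][k] * B[k][j] for k in range(SIZE)) for j in range(SIZE)]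
--                 for i in range(SIZE)]
--
--     def mat_pow(A, e):
--         if e == 0:
--             return [[1 if i == j else 0 for j in range(SIZE)] for i in range(SIZE)]
--         H = mat_pow(A, e // 2)
--         H2 = mat_mul(H, H)
--         return H2 if e % 2 == 0 else mat_mul(H2, A)
--
--     # Transition on the state (b[i-9], ..., b[i], total): rows 0..8 shift the
--     # birth window, row 9 makes the new births, row 10 updates the running total.
--     M = [
--         [0, 1, 0, 0, 0, 0, 0, 0, 0, 0, 0],
--         [0, 0, 1, 0, 0, 0, 0, 0, 0, 0, 0],
--         [0, 0, 0, 1, 0, 0, 0, 0, 0, 0, 0],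
--         [0, 0, 0, 0, 1, 0, 0, 0, 0, 0, 0],
--         [0, 0, 0, 0, 0, 1, 0, 0, 0, 0, 0],
--         [0, 0, 0, 0, 0, 0, 1, 0, 0, 0, 0],
--         [0, 0, 0, 0, 0, 0, 0, 1, 0, 0, 0],
--         [0, 0, 0, 0, 0, 0, 0, 0, 1, 0, 0],
--         [0, 0, 0, 0, 0, 0, 0, 0, 0, 1, 0],
--         [0, 0, 0, 0, 1, 1, 1, 1, 1, 0, 0],
--         [-1, 0, 0, 0, 1, 1, 1, 1, 1, 0, 1],
--     ]
--
--     P = mat_pow(M, max(n - 1, 0))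
--     v = [0] * 9 + [1, 1]
--     return sum(P[10][j] * v[j] for j in range(SIZE))
-- ===== Notes on version B (the rewrite author's own statement) =====
-- stated objective: faster
-- what changed: Replaced A's n-iteration sliding-window loop by exponentiation of the fixed linear transition matrix (birth window plus running total) by repeated squaring.
import Mathlib
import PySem

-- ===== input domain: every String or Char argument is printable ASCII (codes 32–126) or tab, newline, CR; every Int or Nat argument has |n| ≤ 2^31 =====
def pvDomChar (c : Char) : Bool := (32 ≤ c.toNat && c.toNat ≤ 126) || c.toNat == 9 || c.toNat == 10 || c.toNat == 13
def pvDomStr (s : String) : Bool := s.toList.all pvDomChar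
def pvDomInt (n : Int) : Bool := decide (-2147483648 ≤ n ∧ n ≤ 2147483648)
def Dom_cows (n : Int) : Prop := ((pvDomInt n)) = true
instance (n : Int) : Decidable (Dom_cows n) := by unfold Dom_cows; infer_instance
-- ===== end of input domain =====

-- B replaces A's n-step sliding-window loop by exponentiation of the fixed 11-dim
-- linear-transition matrix by repeated squaring (objective: faster).

-- ===== PORT A =====
-- one iteration of A's loop body on the state (res, born); res[-1] and born[0]
-- via pyGetD (both lists are always nonempty here, so the default is never used)
def cowsStep (s : List Int × List Int) : List Int × List Int :=
  let res := s.1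
  let born := s.2
  let temp := PySem.List.pyGetD res (-1) 0 + (PySem.List.slice born (some 4) (some 9)).sum
      - PySem.List.pyGetD born 0 0
  let born' := PySem.List.slice born (some 1) none ++ [(PySem.List.slice born (some 4) (some 9)).sum]
  (PySem.List.slice res (some 1) none ++ [temp], born')

def cows (n : Int) : Int :=
  let init : List Int × List Int := ([0,0,0,0,0,0,0,0,0,1], [0,0,0,0,0,0,0,0,0,1])
  let fin := (PySem.List.pyRange 1 n 1).foldl (fun s _ => cowsStep s) init
  PySem.List.pyGetD fin.1 (-1) 0

-- ===== PORT B =====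
-- Source B's mat_mul on 11×11 list-of-list matrices; A[i][k] etc. are always in
-- range here, so List.getD is exact for Python's indexing
def matMulB (A B : List (List Int)) : List (List Int) :=
  (List.range 11).map fun i => (List.range 11).map fun j =>
    ((List.range 11).map fun k => ((A.getD i []).getD k 0) * ((B.getD k []).getD j 0)).sum

-- Source B's identity matrix  [[1 if i == j else 0 ...] ...]
def matIdB : List (List Int) :=
  (List.range 11).map fun i => (List.range 11).map fun j => if i = j then (1 : Int) else 0

-- Source B's mat_pow: repeated squaring via e // 2
def matPowB (A : List (List Int)) : Nat → List (List Int)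
  | 0 => matIdB
  | (e+1) =>
    let H := matPowB A ((e+1)/2)
    let H2 := matMulB H H
    if (e+1) % 2 = 0 then H2 else matMulB H2 A
  decreasing_by exact Nat.div_lt_self (Nat.succ_pos e) (by omega)

-- Source B's transition-matrix literal M
def matMB : List (List Int) :=
  [[0, 1, 0, 0, 0, 0, 0, 0, 0, 0, 0],
   [0, 0, 1, 0, 0, 0, 0, 0, 0, 0, 0],
   [0, 0, 0, 1, 0, 0, 0, 0, 0, 0, 0],
   [0, 0, 0, 0, 1, 0, 0, 0, 0, 0, 0],
   [0, 0, 0, 0, 0, 1, 0, 0, 0, 0, 0],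
   [0, 0, 0, 0, 0, 0, 1, 0, 0, 0, 0],
   [0, 0, 0, 0, 0, 0, 0, 1, 0, 0, 0],
   [0, 0, 0, 0, 0, 0, 0, 0, 1, 0, 0],
   [0, 0, 0, 0, 0, 0, 0, 0, 0, 1, 0],
   [0, 0, 0, 0, 1, 1, 1, 1, 1, 0, 0],
   [-1, 0, 0, 0, 1, 1, 1, 1, 1, 0, 1]]

-- Source B's  v = [0]*9 + [1, 1]
def vB : List Int := [0, 0, 0, 0, 0, 0, 0, 0, 0, 1, 1]

def cows_alt (n : Int) : Int :=
  let P := matPowB matMB (n - 1).toNat     -- max(n-1, 0) = (n-1).toNat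
  ((List.range 11).map fun j => ((P.getD 10 []).getD j 0) * (vB.getD j 0)).sum

-- ===== PRECONDITION & SPEC =====
def Spec_cows (n : Int) (out : Int) : Prop := out = cows_alt n
instance (n : Int) (out : Int) : Decidable (Spec_cows n out) := by unfold Spec_cows; infer_instance

-- ===== CLAIM (what is proved, stated in full; the proofs are below) =====
def Claim_equal_cows : Prop := ∀ (n : Int), Dom_cows n → Spec_cows n (cows n)

-- ===== LEMMAS AND PROOFS =====

-- the list-of-lists matrices of port B, read as Mathlib matrices
def toMat (L : List (List Int)) : Matrix (Fin 11) (Fin 11) Int :=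
  Matrix.of fun i j => (L.getD i []).getD j 0

theorem sum_map_range_fin (f : Nat → Int) :
    ((List.range 11).map f).sum = ∑ k : Fin 11, f k := by
  simp [List.range_succ, Fin.sum_univ_succ]

theorem getD_map_range_lt {α : Type} (f : Nat → α) (d : α) {i : Nat} (h : i < 11) :
    ((List.range 11).map f).getD i d = f i := by
  rw [List.getD_eq_getElem?_getD, List.getElem?_map, List.getElem?_range h]
  rfl

theorem toMat_matMulB (A B : List (List Int)) :
    toMat (matMulB A B) = toMat A * toMat B := by
  ext i j
  rw [Matrix.mul_apply]
  show ((matMulB A B).getD i []).getD j 0 = _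
  rw [matMulB, getD_map_range_lt _ _ i.isLt, getD_map_range_lt _ _ j.isLt,
    sum_map_range_fin]
  rfl

theorem toMat_matIdB : toMat matIdB = 1 := by
  ext i j
  show ((matIdB.getD i []).getD j 0) = _
  rw [matIdB, getD_map_range_lt _ _ i.isLt, getD_map_range_lt _ _ j.isLt,
    Matrix.one_apply]
  simp [Fin.ext_iff]

theorem toMat_matPowB (A : List (List Int)) (e : Nat) :
    toMat (matPowB A e) = (toMat A) ^ e := by
  induction e using Nat.strong_induction_on with
  | _ e ih =>
    match e with
    | 0 => simp [matPowB, toMat_matIdB]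
    | e+1 =>
      rw [matPowB]
      have h := ih ((e+1)/2) (Nat.div_lt_self (Nat.succ_pos e) (by omega))
      by_cases hp : (e+1) % 2 = 0
      · rw [if_pos hp, toMat_matMulB, h, ← pow_add]
        congr 1; omega
      · rw [if_neg hp, toMat_matMulB, toMat_matMulB, h, ← pow_add, ← pow_succ]
        congr 1; omega

-- the initial state of A as a vector: birth window [0,…,0,1], total 1
def vInit : Fin 11 → Int := ![0,0,0,0,0,0,0,0,0,1,1]

-- the loop invariant: res has length 10 with last entry w 10, born is the window w 0 .. w 9
def CowsInv (s : List Int × List Int) (w : Fin 11 → Int) : Prop :=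
  s.1.length = 10 ∧ PySem.List.pyGetD s.1 (-1) 0 = w 10 ∧
    s.2 = [w 0, w 1, w 2, w 3, w 4, w 5, w 6, w 7, w 8, w 9]

theorem mulVec_matMB (w : Fin 11 → Int) :
    (toMat matMB).mulVec w = ![w 1, w 2, w 3, w 4, w 5, w 6, w 7, w 8, w 9,
      w 4 + w 5 + w 6 + w 7 + w 8,
      w 10 + (w 4 + w 5 + w 6 + w 7 + w 8) - w 0] := by
  funext i
  fin_cases i <;>
    simp [toMat, matMB, Matrix.mulVec, dotProduct, Fin.sum_univ_succ] <;> ring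

theorem step_inv (s : List Int × List Int) (w : Fin 11 → Int) (h : CowsInv s w) :
    CowsInv (cowsStep s) ((toMat matMB).mulVec w) := by
  obtain ⟨h1, h2, h3⟩ := h
  rw [mulVec_matMB]
  refine ⟨?_, ?_, ?_⟩
  · simp [cowsStep, PySem.List.slice_from_one, h1]
  · rw [cowsStep]
    simp only [PySem.List.pyGetD_neg_one_append_singleton]
    rw [h2, h3]
    show _ + (PySem.List.slice _ (some 4) (some 9)).sum - _ = _
    simp [PySem.List.slice_toNat, PySem.List.pyGetD_zero_cons]
    ring
  · rw [cowsStep]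
    show PySem.List.slice s.2 (some 1) none ++ [(PySem.List.slice s.2 (some 4) (some 9)).sum] = _
    rw [h3]
    simp [PySem.List.slice_from_one, PySem.List.slice_toNat]
    ring

theorem fold_inv (l : List Int) (s : List Int × List Int) (w : Fin 11 → Int) (h : CowsInv s w) :
    CowsInv (l.foldl (fun s _ => cowsStep s) s) (((toMat matMB) ^ l.length).mulVec w) := by
  induction l generalizing s w with
  | nil => simpa using h
  | cons x xs ih =>
    have := ih (cowsStep s) ((toMat matMB).mulVec w) (step_inv s w h)
    simpa [Matrix.mulVec_mulVec, pow_succ] using this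

theorem inv_init : CowsInv ([0,0,0,0,0,0,0,0,0,1], [0,0,0,0,0,0,0,0,0,1]) vInit := by
  refine ⟨rfl, by decide, by decide⟩

theorem cows_alt_eq (n : Int) :
    cows_alt n = (((toMat matMB) ^ (n - 1).toNat).mulVec vInit) 10 := by
  rw [cows_alt, sum_map_range_fin]
  have hv : ∀ j : Fin 11, vB.getD j 0 = vInit j := by decide
  have hP : ∀ j : Fin 11,
      ((matPowB matMB (n - 1).toNat).getD 10 []).getD j 0 = toMat (matPowB matMB (n - 1).toNat) 10 j := by
    intro j; rfl
  calc (∑ j : Fin 11, ((matPowB matMB (n - 1).toNat).getD 10 []).getD j 0 * vB.getD j 0)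
      = ∑ j : Fin 11, toMat (matPowB matMB (n - 1).toNat) 10 j * vInit j := by
        refine Finset.sum_congr rfl fun j _ => ?_; rw [hv j, hP j]
    _ = (((toMat matMB) ^ (n - 1).toNat).mulVec vInit) 10 := by
        rw [toMat_matPowB]; rfl

-- ===== VERDICT (by name: the statement is the Claim_ definition above) =====
theorem cows_spec : Claim_equal_cows := by
  intro n _
  show cows n = cows_alt n
  rw [cows_alt_eq]
  have h := fold_inv (PySem.List.pyRange 1 n 1)
    ([0,0,0,0,0,0,0,0,0,1], [0,0,0,0,0,0,0,0,0,1]) vInit inv_init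
  rw [PySem.List.length_pyRange_one] at h
  simp only [cows]
  exact h.2.1
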